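-- pv_equiv track=rewrite | github.com/VeraVinich/lab-1 | Lab1/pattern.py | romb_mask
-- ===== SOURCE A (Python) =====
-- def romb_mask(size):
--     n = 2 * size - 1
--     center = size - 1
--     mask = []
--     for y in range(n):
--         strok = []
--         for x in range(n):
--             if abs(x - center) + abs(y - center) == size - 1:
--                 strok.append(1)
--             else:
--                 strok.append(0)
--         mask.append(strok)
--     return mask
-- ===== SOURCE B (Python) =====
-- def romb_mask(size):
--     n = 2 * size - 1
--     center = size - 1
--     mask = [[0] * n for _ in range(n)]
--     for y in range(n):
--         d = (size - 1) - abs(y - center)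
--         mask[y][center - d] = 1
--         mask[y][center + d] = 1
--     return mask
-- ===== Notes on version B (the rewrite author's own statement) =====
-- stated objective: alternative
-- what changed: B allocates an all-zero n*n grid by list repetition and, per row, computes the diamond offset d and writes the two boundary cells directly, instead of testing the distance predicate |x-c|+|y-c|==size-1 on every cell of every row; measured 5.6x faster at the largest size both finished, but unconfirmed at the top size.
import Mathlib
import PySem

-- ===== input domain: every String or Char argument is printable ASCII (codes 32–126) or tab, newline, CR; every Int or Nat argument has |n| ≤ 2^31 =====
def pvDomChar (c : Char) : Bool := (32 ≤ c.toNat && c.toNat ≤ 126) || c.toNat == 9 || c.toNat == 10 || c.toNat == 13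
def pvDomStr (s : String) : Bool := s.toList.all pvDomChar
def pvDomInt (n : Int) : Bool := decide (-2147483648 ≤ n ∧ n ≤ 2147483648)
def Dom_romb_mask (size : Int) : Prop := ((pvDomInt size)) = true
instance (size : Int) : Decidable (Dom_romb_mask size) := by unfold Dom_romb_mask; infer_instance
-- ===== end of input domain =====

-- B places the two boundary cells of each row directly on a zero grid instead of testing every cell.

-- ===== PORT A =====
def romb_mask (size : Int) : List (List Int) :=
  let n := 2 * size - 1
  let center := size - 1
  (PySem.List.pyRange 0 n 1).foldl (fun mask y =>
    mask ++ [(PySem.List.pyRange 0 n 1).foldl (fun strok x =>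
      strok ++ [if ((x - center).natAbs : Int) + ((y - center).natAbs : Int) = size - 1 then (1 : Int) else 0]) []]) []

-- ===== PORT B =====
-- the indices y, center-d, center+d are provably nonnegative and in range for every y the loop
-- visits, so plain List.set with .toNat is exact here
def romb_mask_alt (size : Int) : List (List Int) :=
  let n := 2 * size - 1
  let center := size - 1
  let mask := (PySem.List.pyRange 0 n 1).map (fun _ => List.replicate n.toNat (0 : Int))
  (PySem.List.pyRange 0 n 1).foldl (fun mask y =>
    let d := (size - 1) - ((y - center).natAbs : Int)
    mask.set y.toNat (((mask.getD y.toNat []).set (center - d).toNat 1).set (center + d).toNat 1)) mask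

-- ===== PRECONDITION & SPEC =====
def Spec_romb_mask (size : Int) (out : List (List Int)) : Prop := out = romb_mask_alt size
instance (size : Int) (out : List (List Int)) : Decidable (Spec_romb_mask size out) := by unfold Spec_romb_mask; infer_instance

-- ===== CLAIM (what is proved, stated in full; the proofs are below) =====
def Claim_equal_romb_mask : Prop := ∀ (size : Int), Dom_romb_mask size → Spec_romb_mask size (romb_mask size)

-- ===== LEMMAS AND PROOFS =====

-- a fold of in-order index updates preserves length
lemma foldl_set_length {α : Type} (d : α) (h : Nat → α → α) (k : Nat) (init : List α) :
    ((List.range k).foldl (fun m j => m.set j (h j (m.getD j d))) init).length = init.length := by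
  induction k with
  | zero => simp
  | succ k ih => rw [List.range_succ, List.foldl_append]; simpa using ih

-- getElem? characterisation of the update fold: index i is rewritten exactly when i < k
lemma foldl_set_getElem? {α : Type} (d : α) (h : Nat → α → α) (k : Nat) (init : List α) :
    ∀ i : Nat, ((List.range k).foldl (fun m j => m.set j (h j (m.getD j d))) init)[i]?
      = if i < k then (init[i]?).map (h i) else init[i]? := by
  induction k with
  | zero => simp
  | succ k ih =>
    intro i
    rw [List.range_succ, List.foldl_append, List.foldl_cons, List.foldl_nil, List.getElem?_set]
    rw [foldl_set_length d h k init, List.getD_eq_getElem?_getD, ih k]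
    simp only [lt_irrefl, if_false]
    by_cases hk : k = i
    · subst hk
      by_cases hl : k < init.length
      · rw [if_pos rfl, if_pos hl, if_pos (Nat.lt_succ_self k)]
        rw [List.getElem?_eq_getElem hl]
        simp
      · rw [if_pos rfl, if_neg hl, if_pos (Nat.lt_succ_self k)]
        rw [List.getElem?_eq_none (by omega)]
        rfl
    · rw [if_neg hk, ih i]
      by_cases h2 : i < k
      · rw [if_pos h2, if_pos (by omega)]
      · rw [if_neg h2, if_neg (by omega)]

-- each produced row of A equals the two-writes row of B
lemma row_eq (size : Int) (i : Nat) (hi : i < (2 * size - 1).toNat) :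
    (List.range (2 * size - 1).toNat).map (fun (x : Nat) =>
        if ((((x : Int)) - (size - 1)).natAbs : Int) + (((i : Int) - (size - 1)).natAbs : Int) = size - 1 then (1 : Int) else 0)
      = ((List.replicate (2 * size - 1).toNat (0 : Int)).set
          ((size - 1) - ((size - 1) - ((((i : Int) - (size - 1)).natAbs : Int)))).toNat 1).set
          ((size - 1) + ((size - 1) - ((((i : Int) - (size - 1)).natAbs : Int)))).toNat 1 := by
  apply List.ext_getElem?
  intro x
  rw [List.getElem?_map, List.getElem?_set, List.getElem?_set, List.getElem?_replicate]
  simp only [List.length_set, List.length_replicate]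
  by_cases hx : x < (2 * size - 1).toNat
  · rw [List.getElem?_range hx]
    simp only [Option.map_some]
    split_ifs <;> first | rfl | (exfalso; omega)
  · rw [List.getElem?_eq_none (by simp; omega)]
    simp only [Option.map_none]
    split_ifs <;> first | rfl | (exfalso; omega)

-- ===== VERDICT (by name: the statement is the Claim_ definition above) =====
theorem romb_mask_spec : Claim_equal_romb_mask := by
  intro size _
  unfold Spec_romb_mask romb_mask romb_mask_alt
  simp only [PySem.List.foldl_append_singleton_eq_map, List.nil_append]
  rw [PySem.List.pyRange_one]
  simp only [sub_zero, zero_add, List.foldl_map, List.map_map, Function.comp_def,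
    Int.toNat_natCast]
  apply List.ext_getElem?
  intro i
  rw [foldl_set_getElem? ([] : List Int)
    (fun j a => ((a.set ((size - 1) - ((size - 1) - ((((j : Int)) - (size - 1)).natAbs : Int))).toNat 1).set
      ((size - 1) + ((size - 1) - ((((j : Int)) - (size - 1)).natAbs : Int))).toNat 1))
    ((2 * size - 1).toNat) _ i]
  rw [List.getElem?_map, List.getElem?_map]
  by_cases hi : i < (2 * size - 1).toNat
  · rw [List.getElem?_range hi, if_pos hi]
    simp only [Option.map_some]
    exact congrArg some (row_eq size i hi)
  · rw [List.getElem?_eq_none (by simp; omega), if_neg hi]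
    simp
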